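-- pv_equiv track=rewrite | github.com/MuriloRyan/dracma2048 | Dracma2048/bitops.py | sbox
-- ===== SOURCE A (Python) =====
-- sbox_table = [
--     0x63, 0x7c, 0x77, 0x7b, 0xf2, 0x6b, 0x6f, 0xc5, 0x30, 0x01, 0x67, 0x2b, 0xfe, 0xd7, 0xab, 0x76,
--     0xca, 0x82, 0xc9, 0x7d, 0xfa, 0x59, 0x47, 0xf0, 0xad, 0xd4, 0xa2, 0xaf, 0x9c, 0xa4, 0x72, 0xc0,
--     0xb7, 0xfd, 0x93, 0x26, 0x36, 0x3f, 0xf7, 0xcc, 0x34, 0xa5, 0xe5, 0xf1, 0x71, 0xd8, 0x31, 0x15,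
--     0x04, 0xc7, 0x23, 0xc3, 0x18, 0x96, 0x05, 0x9a, 0x07, 0x12, 0x80, 0xe2, 0xeb, 0x27, 0xb2, 0x75,
--     0x09, 0x83, 0x2c, 0x1a, 0x1b, 0x6e, 0x5a, 0xa0, 0x52, 0x3b, 0xd6, 0xb3, 0x29, 0xe3, 0x2f, 0x84,
--     0x53, 0xd1, 0x00, 0xed, 0x20, 0xfc, 0xb1, 0x5b, 0x6a, 0xcb, 0xbe, 0x39, 0x4a, 0x4c, 0x58, 0xcf,
--     0xd0, 0xef, 0xaa, 0xfb, 0x43, 0x4d, 0x33, 0x85, 0x45, 0xf9, 0x02, 0x7f, 0x50, 0x3c, 0x9f, 0xa8,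
--     0x51, 0xa3, 0x40, 0x8f, 0x92, 0x9d, 0x38, 0xf5, 0xbc, 0xb6, 0xda, 0x21, 0x10, 0xff, 0xf3, 0xd2,
--     0xcd, 0x0c, 0x13, 0xec, 0x5f, 0x97, 0x44, 0x17, 0xc4, 0xa7, 0x7e, 0x3d, 0x64, 0x5d, 0x19, 0x73,
--     0x60, 0x81, 0x4f, 0xdc, 0x22, 0x2a, 0x90, 0x88, 0x46, 0xee, 0xb8, 0x14, 0xde, 0x5e, 0x0b, 0xdb,
--     0xe0, 0x32, 0x3a, 0x0a, 0x49, 0x06, 0x24, 0x5c, 0xc2, 0xd3, 0xac, 0x62, 0x91, 0x95, 0xe4, 0x79,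
--     0xe7, 0xc8, 0x37, 0x6d, 0x8d, 0xd5, 0x4e, 0xa9, 0x6c, 0x56, 0xf4, 0xea, 0x65, 0x7a, 0xae, 0x08,
--     0xba, 0x78, 0x25, 0x2e, 0x1c, 0xa6, 0xb4, 0xc6, 0xe8, 0xdd, 0x74, 0x1f, 0x4b, 0xbd, 0x8b, 0x8a,
--     0x70, 0x3e, 0xb5, 0x66, 0x48, 0x03, 0xf6, 0x0e, 0x61, 0x35, 0x57, 0xb9, 0x86, 0xc1, 0x1d, 0x9e,
--     0xe1, 0xf8, 0x98, 0x11, 0x69, 0xd9, 0x8e, 0x94, 0x9b, 0x1e, 0x87, 0xe9, 0xce, 0x55, 0x28, 0xdf,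
--     0x8c, 0xa1, 0x89, 0x0d, 0xbf, 0xe6, 0x42, 0x68, 0x41, 0x99, 0x2d, 0x0f, 0xb0, 0x54, 0xbb, 0x16
-- ]
--
-- def sbox(binary_sequence):
--     binary_list = list(bin(adjust(binary_sequence))[2:].zfill(2048))
--     n = len(binary_list)
--
--     sbox_sequence = ""
--     for i in range(0, n, 8):
--         chunk = binary_list[i:i+8]
--         decimal_value = int("".join(chunk), 2)
--         substituted_value = sbox_table[decimal_value]
--         substituted_chunk = list(bin(substituted_value)[2:].zfill(8))
--         sbox_sequence += "".join(substituted_chunk)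
--
--     return int(sbox_sequence, 2)
--
-- def adjust(message, length=2048):
--     message = int(message)
--
--     if message.bit_length() < length:
--         message = int(bin(message)[2:]+'1',base=2)
--         message = message << (length - message.bit_length())
--     elif message.bit_length() > length:
--         message = message >> (message.bit_length() - length)
--
--     return message
-- ===== SOURCE B (Python) =====
-- sbox_table = [
--     0x63, 0x7c, 0x77, 0x7b, 0xf2, 0x6b, 0x6f, 0xc5, 0x30, 0x01, 0x67, 0x2b, 0xfe, 0xd7, 0xab, 0x76,
--     0xca, 0x82, 0xc9, 0x7d, 0xfa, 0x59, 0x47, 0xf0, 0xad, 0xd4, 0xa2, 0xaf, 0x9c, 0xa4, 0x72, 0xc0,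
--     0xb7, 0xfd, 0x93, 0x26, 0x36, 0x3f, 0xf7, 0xcc, 0x34, 0xa5, 0xe5, 0xf1, 0x71, 0xd8, 0x31, 0x15,
--     0x04, 0xc7, 0x23, 0xc3, 0x18, 0x96, 0x05, 0x9a, 0x07, 0x12, 0x80, 0xe2, 0xeb, 0x27, 0xb2, 0x75,
--     0x09, 0x83, 0x2c, 0x1a, 0x1b, 0x6e, 0x5a, 0xa0, 0x52, 0x3b, 0xd6, 0xb3, 0x29, 0xe3, 0x2f, 0x84,
--     0x53, 0xd1, 0x00, 0xed, 0x20, 0xfc, 0xb1, 0x5b, 0x6a, 0xcb, 0xbe, 0x39, 0x4a, 0x4c, 0x58, 0xcf,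
--     0xd0, 0xef, 0xaa, 0xfb, 0x43, 0x4d, 0x33, 0x85, 0x45, 0xf9, 0x02, 0x7f, 0x50, 0x3c, 0x9f, 0xa8,
--     0x51, 0xa3, 0x40, 0x8f, 0x92, 0x9d, 0x38, 0xf5, 0xbc, 0xb6, 0xda, 0x21, 0x10, 0xff, 0xf3, 0xd2,
--     0xcd, 0x0c, 0x13, 0xec, 0x5f, 0x97, 0x44, 0x17, 0xc4, 0xa7, 0x7e, 0x3d, 0x64, 0x5d, 0x19, 0x73,
--     0x60, 0x81, 0x4f, 0xdc, 0x22, 0x2a, 0x90, 0x88, 0x46, 0xee, 0xb8, 0x14, 0xde, 0x5e, 0x0b, 0xdb,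
--     0xe0, 0x32, 0x3a, 0x0a, 0x49, 0x06, 0x24, 0x5c, 0xc2, 0xd3, 0xac, 0x62, 0x91, 0x95, 0xe4, 0x79,
--     0xe7, 0xc8, 0x37, 0x6d, 0x8d, 0xd5, 0x4e, 0xa9, 0x6c, 0x56, 0xf4, 0xea, 0x65, 0x7a, 0xae, 0x08,
--     0xba, 0x78, 0x25, 0x2e, 0x1c, 0xa6, 0xb4, 0xc6, 0xe8, 0xdd, 0x74, 0x1f, 0x4b, 0xbd, 0x8b, 0x8a,
--     0x70, 0x3e, 0xb5, 0x66, 0x48, 0x03, 0xf6, 0x0e, 0x61, 0x35, 0x57, 0xb9, 0x86, 0xc1, 0x1d, 0x9e,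
--     0xe1, 0xf8, 0x98, 0x11, 0x69, 0xd9, 0x8e, 0x94, 0x9b, 0x1e, 0x87, 0xe9, 0xce, 0x55, 0x28, 0xdf,
--     0x8c, 0xa1, 0x89, 0x0d, 0xbf, 0xe6, 0x42, 0x68, 0x41, 0x99, 0x2d, 0x0f, 0xb0, 0x54, 0xbb, 0x16
-- ]
--
-- # the whole S-box packed big-endian into one integer: byte b (from the top) is sbox_table[b]
-- _SBOX_INT = 0x637c777bf26b6fc53001672bfed7ab76ca82c97dfa5947f0add4a2af9ca472c0b7fd9326363ff7cc34a5e5f171d8311504c723c31896059a071280e2eb27b27509832c1a1b6e5aa0523bd6b329e32f8453d100ed20fcb15b6acbbe394a4c58cfd0efaafb434d338545f9027f503c9fa851a3408f929d38f5bcb6da2110fff3d2cd0c13ec5f974417c4a77e3d645d197360814fdc222a908846eeb814de5e0bdbe0323a0a4906245cc2d3ac629195e479e7c8376d8dd54ea96c56f4ea657aae08ba78252e1ca6b4c6e8dd741f4bbd8b8a703eb5664803f60e613557b986c11d9ee1f8981169d98e949b1e87e9ce5528df8ca1890dbfe6426841992d0fb054bb16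
--
-- def _tbl(b):
--     return (_SBOX_INT >> ((255 - b) * 8)) & 255
--
-- def _norm(v, length=2048):
--     L = v.bit_length()
--     if L < length:
--         return (2 * v + 1) << (length - 1 - L)
--     if L > length:
--         return v >> (L - length)
--     return v
--
-- def sbox(binary_sequence):
--     v = _norm(int(binary_sequence))
--     out = 0
--     for i in range(256):
--         out += _tbl((v >> (8 * i)) & 255) << (8 * i)
--     return out
-- ===== Notes on version B (the rewrite author's own statement) =====
-- stated objective: alternative
-- what changed: Replaces A's binary-string pipeline (bin/zfill, slicing eight-character chunks, re-parsing and re-formatting each chunk as a string, concatenation, final int(s,2)) with pure integer arithmetic: the S-box packed into one wide integer constant indexed by shift-and-mask, bit-length computed arithmetically, and a single shift/mask/add loop over the bytes of the value, never materialising any string or list; Pre_ excludes negative inputs, on which A raises ValueError.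
import Mathlib
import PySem

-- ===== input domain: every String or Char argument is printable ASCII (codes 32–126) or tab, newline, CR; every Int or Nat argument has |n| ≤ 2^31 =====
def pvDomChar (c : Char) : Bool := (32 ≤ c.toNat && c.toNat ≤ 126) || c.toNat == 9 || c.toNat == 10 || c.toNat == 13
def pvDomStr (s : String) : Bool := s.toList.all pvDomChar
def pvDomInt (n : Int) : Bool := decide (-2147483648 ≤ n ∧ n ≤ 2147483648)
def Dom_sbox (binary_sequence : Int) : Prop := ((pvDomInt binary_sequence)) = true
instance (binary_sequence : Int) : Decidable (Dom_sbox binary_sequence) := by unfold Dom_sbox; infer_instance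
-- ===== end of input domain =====

-- B replaces A's binary-string chunk pipeline with pure integer arithmetic:
-- the table packed into one wide constant, one shift/mask/add loop over the
-- bytes of the value; no strings or lists at all.

-- ===== PORT A =====
def sboxTableList : List Nat := [
  0x63, 0x7c, 0x77, 0x7b, 0xf2, 0x6b, 0x6f, 0xc5, 0x30, 0x01, 0x67, 0x2b, 0xfe, 0xd7, 0xab, 0x76,
  0xca, 0x82, 0xc9, 0x7d, 0xfa, 0x59, 0x47, 0xf0, 0xad, 0xd4, 0xa2, 0xaf, 0x9c, 0xa4, 0x72, 0xc0,
  0xb7, 0xfd, 0x93, 0x26, 0x36, 0x3f, 0xf7, 0xcc, 0x34, 0xa5, 0xe5, 0xf1, 0x71, 0xd8, 0x31, 0x15,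
  0x04, 0xc7, 0x23, 0xc3, 0x18, 0x96, 0x05, 0x9a, 0x07, 0x12, 0x80, 0xe2, 0xeb, 0x27, 0xb2, 0x75,
  0x09, 0x83, 0x2c, 0x1a, 0x1b, 0x6e, 0x5a, 0xa0, 0x52, 0x3b, 0xd6, 0xb3, 0x29, 0xe3, 0x2f, 0x84,
  0x53, 0xd1, 0x00, 0xed, 0x20, 0xfc, 0xb1, 0x5b, 0x6a, 0xcb, 0xbe, 0x39, 0x4a, 0x4c, 0x58, 0xcf,
  0xd0, 0xef, 0xaa, 0xfb, 0x43, 0x4d, 0x33, 0x85, 0x45, 0xf9, 0x02, 0x7f, 0x50, 0x3c, 0x9f, 0xa8,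
  0x51, 0xa3, 0x40, 0x8f, 0x92, 0x9d, 0x38, 0xf5, 0xbc, 0xb6, 0xda, 0x21, 0x10, 0xff, 0xf3, 0xd2,
  0xcd, 0x0c, 0x13, 0xec, 0x5f, 0x97, 0x44, 0x17, 0xc4, 0xa7, 0x7e, 0x3d, 0x64, 0x5d, 0x19, 0x73,
  0x60, 0x81, 0x4f, 0xdc, 0x22, 0x2a, 0x90, 0x88, 0x46, 0xee, 0xb8, 0x14, 0xde, 0x5e, 0x0b, 0xdb,
  0xe0, 0x32, 0x3a, 0x0a, 0x49, 0x06, 0x24, 0x5c, 0xc2, 0xd3, 0xac, 0x62, 0x91, 0x95, 0xe4, 0x79,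
  0xe7, 0xc8, 0x37, 0x6d, 0x8d, 0xd5, 0x4e, 0xa9, 0x6c, 0x56, 0xf4, 0xea, 0x65, 0x7a, 0xae, 0x08,
  0xba, 0x78, 0x25, 0x2e, 0x1c, 0xa6, 0xb4, 0xc6, 0xe8, 0xdd, 0x74, 0x1f, 0x4b, 0xbd, 0x8b, 0x8a,
  0x70, 0x3e, 0xb5, 0x66, 0x48, 0x03, 0xf6, 0x0e, 0x61, 0x35, 0x57, 0xb9, 0x86, 0xc1, 0x1d, 0x9e,
  0xe1, 0xf8, 0x98, 0x11, 0x69, 0xd9, 0x8e, 0x94, 0x9b, 0x1e, 0x87, 0xe9, 0xce, 0x55, 0x28, 0xdf,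
  0x8c, 0xa1, 0x89, 0x0d, 0xbf, 0xe6, 0x42, 0x68, 0x41, 0x99, 0x2d, 0x0f, 0xb0, 0x54, 0xbb, 0x16]

-- Python int.bit_length of |n|, hand-ported (exact)
def bitLenN (n : Nat) : Nat :=
  if h : n = 0 then 0 else bitLenN (n / 2) + 1
termination_by n
decreasing_by exact Nat.div_lt_self (Nat.pos_of_ne_zero h) one_lt_two

def pyBitLength (m : Int) : Nat := bitLenN m.natAbs

-- bin(n)[2:] for n ≥ 0, MSB first (exact for nonnegative n; negatives are excluded by Pre_)
def binCharsGo (n : Nat) : List Char :=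
  if h : n = 0 then [] else binCharsGo (n / 2) ++ [if n % 2 = 1 then '1' else '0']
termination_by n
decreasing_by exact Nat.div_lt_self (Nat.pos_of_ne_zero h) one_lt_two

def binChars (n : Nat) : List Char := if n = 0 then ['0'] else binCharsGo n

-- s.zfill(k) for '0'/'1' strings (exact: pads with '0' on the left up to width k)
def padTo (k : Nat) (s : List Char) : List Char := List.replicate (k - s.length) '0' ++ s

-- int(s, 2) for strings of '0'/'1' (exact on such strings)
def parseBin (s : List Char) : Nat :=
  s.foldl (fun a c => 2 * a + (if c = '1' then 1 else 0)) 0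

-- transliteration of Python adjust; int(bin(message)[2:]+'1', 2) = 2*message+1 exactly for
-- message ≥ 0 (Python raises on negatives there; excluded by Pre_); >> is floordiv by 2^k
def adjust (message : Int) (len2 : Nat) : Int :=
  if pyBitLength message < len2 then
    let m := 2 * message + 1
    m * 2 ^ (len2 - pyBitLength m)
  else if pyBitLength message > len2 then
    PySem.Int.floordiv message (2 ^ (pyBitLength message - len2))
  else message

-- A's loop 'for i in range(0, n, 8): chunk = binary_list[i:i+8] …', rendered as the obvious
-- recursion over the same successive 8-character chunks (n = 2048 is a multiple of 8)
def sboxChunks (l : List Char) : List Char :=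
  if _h : l = [] then []
  else
    padTo 8 (binChars (sboxTableList.getD (parseBin (l.take 8)) 0)) ++ sboxChunks (l.drop 8)
termination_by l.length
decreasing_by
  have : 0 < l.length := List.length_pos_iff.mpr _h
  simp [List.length_drop]; omega

def sbox (binary_sequence : Int) : Int :=
  -- bin(adjust(..)) via toNat: exact because adjust's value is nonnegative on Pre_
  let v := (adjust binary_sequence 2048).toNat
  let binaryList := padTo 2048 (binChars v)
  Int.ofNat (parseBin (sboxChunks binaryList))

-- ===== PORT B =====
-- the whole S-box packed big-endian into one 2048-bit constant (Source B's _SBOX_INT)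
def sboxPacked : Nat := 0x637c777bf26b6fc53001672bfed7ab76ca82c97dfa5947f0add4a2af9ca472c0b7fd9326363ff7cc34a5e5f171d8311504c723c31896059a071280e2eb27b27509832c1a1b6e5aa0523bd6b329e32f8453d100ed20fcb15b6acbbe394a4c58cfd0efaafb434d338545f9027f503c9fa851a3408f929d38f5bcb6da2110fff3d2cd0c13ec5f974417c4a77e3d645d197360814fdc222a908846eeb814de5e0bdbe0323a0a4906245cc2d3ac629195e479e7c8376d8dd54ea96c56f4ea657aae08ba78252e1ca6b4c6e8dd741f4bbd8b8a703eb5664803f60e613557b986c11d9ee1f8981169d98e949b1e87e9ce5528df8ca1890dbfe6426841992d0fb054bb16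

-- Source B _tbl: (_SBOX_INT >> ((255 - b) * 8)) & 255
def tbl (b : Nat) : Nat := sboxPacked >>> ((255 - b) * 8) &&& 255

-- Source B _norm: arithmetic normalisation to exactly 2048 bits (exact for v ≥ 0)
def normAlt (v : Nat) (len2 : Nat) : Nat :=
  let L := if v = 0 then 0 else Nat.log2 v + 1   -- v.bit_length() for v ≥ 0
  if L < len2 then (2 * v + 1) <<< (len2 - 1 - L)
  else if L > len2 then v >>> (L - len2)
  else v

def sbox_alt (binary_sequence : Int) : Int :=
  -- toNat is exact on Pre_ (binary_sequence ≥ 0)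
  let v := normAlt binary_sequence.toNat 2048
  Int.ofNat ((List.range 256).foldl
    (fun out i => out + (tbl (v >>> (8 * i) &&& 255)) <<< (8 * i)) 0)

-- ===== PRECONDITION & SPEC =====
-- A raises ValueError on every negative input (bin(message)[2:] of a negative is 'b…',
-- not parseable in base 2); Pre_ admits exactly the inputs on which A returns.
def Pre_sbox (binary_sequence : Int) : Prop := 0 ≤ binary_sequence
instance (binary_sequence : Int) : Decidable (Pre_sbox binary_sequence) := by
  unfold Pre_sbox; infer_instance

def pvWitness_sbox : Int := (5)

def Spec_sbox (binary_sequence : Int) (out : Int) : Prop := out = sbox_alt binary_sequence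
instance (binary_sequence : Int) (out : Int) : Decidable (Spec_sbox binary_sequence out) := by
  unfold Spec_sbox; infer_instance

-- ===== CLAIM (what is proved, stated in full; the proofs are below) =====
def Claim_equal_sbox : Prop := ∀ (binary_sequence : Int), Dom_sbox binary_sequence →
  Pre_sbox binary_sequence → Spec_sbox binary_sequence (sbox binary_sequence)

-- ===== LEMMAS AND PROOFS =====

-- fixed-width k-bit big-endian representation (proof device)
def bitsFix : Nat → Nat → List Char
  | 0, _ => []
  | k + 1, v => bitsFix k (v / 2) ++ [if v % 2 = 1 then '1' else '0']

theorem length_bitsFix (k v : Nat) : (bitsFix k v).length = k := by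
  induction k generalizing v with
  | zero => rfl
  | succ k ih => simp [bitsFix, ih]

theorem bitsFix_split (b a v : Nat) :
    bitsFix (a + b) v = bitsFix a (v / 2 ^ b) ++ bitsFix b (v % 2 ^ b) := by
  induction b generalizing v with
  | zero => simp [bitsFix]
  | succ b ih =>
    show bitsFix (a + b + 1) v = _
    rw [bitsFix, ih]
    have h1 : v / 2 / 2 ^ b = v / 2 ^ (b + 1) := by
      rw [Nat.div_div_eq_div_mul, pow_succ']
    have h2 : v / 2 % 2 ^ b = v % 2 ^ (b + 1) / 2 := by
      have hq : v = 2 ^ (b + 1) * (v / 2 ^ (b + 1)) + v % 2 ^ (b + 1) :=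
        (Nat.div_add_mod v (2 ^ (b + 1))).symm
      set q := v / 2 ^ (b + 1)
      set r := v % 2 ^ (b + 1) with hr
      have hrlt : r < 2 ^ (b + 1) := Nat.mod_lt _ (Nat.two_pow_pos _)
      have hv2 : v / 2 = 2 ^ b * q + r / 2 := by
        conv_lhs => rw [hq, pow_succ', mul_assoc]
        rw [Nat.mul_add_div (by norm_num)]
      rw [hv2, Nat.mul_add_mod]
      apply Nat.mod_eq_of_lt
      rw [pow_succ] at hrlt
      omega
    have h3 : v % 2 ^ (b + 1) % 2 = v % 2 := by
      rw [Nat.mod_mod_of_dvd _ (dvd_pow_self 2 (Nat.succ_ne_zero b))]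
    rw [h1, h2, ← h3]
    simp [bitsFix]

theorem parse_foldl_shift (ys : List Char) (a : Nat) :
    ys.foldl (fun a c => 2 * a + (if c = '1' then 1 else 0)) a
      = a * 2 ^ ys.length + parseBin ys := by
  induction ys generalizing a with
  | nil => simp [parseBin]
  | cons c ys ih =>
    simp only [List.foldl_cons, List.length_cons]
    rw [ih]
    have h2 : parseBin (c :: ys) = (if c = '1' then 1 else 0) * 2 ^ ys.length + parseBin ys := by
      show List.foldl _ 0 (c :: ys) = _
      rw [List.foldl_cons, ih]
      ring_nf
    rw [h2]
    ring

theorem parseBin_append (xs ys : List Char) :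
    parseBin (xs ++ ys) = parseBin xs * 2 ^ ys.length + parseBin ys := by
  unfold parseBin
  rw [List.foldl_append]
  exact parse_foldl_shift ys _

theorem parseBin_bitsFix (k v : Nat) (h : v < 2 ^ k) : parseBin (bitsFix k v) = v := by
  induction k generalizing v with
  | zero =>
    interval_cases v
    rfl
  | succ k ih =>
    have hv : v / 2 < 2 ^ k := by
      rw [pow_succ] at h; omega
    rw [bitsFix, parseBin_append, ih _ hv]
    have : parseBin [if v % 2 = 1 then '1' else '0'] = v % 2 := by
      rcases Nat.mod_two_eq_zero_or_one v with h2 | h2 <;> simp [parseBin, h2]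
    rw [this]
    simp only [List.length_singleton, pow_one]
    omega

theorem padTo_binChars (k v : Nat) (hk : 1 ≤ k) (hv : v < 2 ^ k) :
    padTo k (binChars v) = bitsFix k v := by
  induction k generalizing v with
  | zero => omega
  | succ k ih =>
    by_cases hk0 : k = 0
    · subst hk0
      interval_cases v <;> simp [padTo, binChars, binCharsGo, bitsFix]
    have hk1 : 1 ≤ k := Nat.pos_of_ne_zero hk0
    have hv2 : v / 2 < 2 ^ k := by rw [pow_succ] at hv; omega
    rw [bitsFix, ← ih _ hk1 hv2]
    rcases Nat.lt_or_ge v 2 with h2 | h2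
    · obtain ⟨k', rfl⟩ := Nat.exists_eq_succ_of_ne_zero hk0
      have e0 : binCharsGo 0 = [] := by rw [binCharsGo]; rfl
      have e1 : binCharsGo 1 = ['1'] := by rw [binCharsGo]; simp [e0]
      have b0 : binChars 0 = ['0'] := rfl
      have b1 : binChars 1 = ['1'] := by unfold binChars; rw [if_neg one_ne_zero, e1]
      have hps : ∀ (m : Nat) (c : Char), padTo (m + 1) [c] = List.replicate m '0' ++ [c] := by
        intro m c; unfold padTo; norm_num
      interval_cases v
      · show padTo (k' + 1 + 1) (binChars 0) = padTo (k' + 1) (binChars 0) ++ ['0']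
        rw [b0, hps, hps, List.replicate_succ', List.append_assoc]
      · show padTo (k' + 1 + 1) (binChars 1) = padTo (k' + 1) (binChars 0) ++ ['1']
        rw [b0, b1, hps, hps, List.replicate_succ', List.append_assoc]
    · -- v ≥ 2
      have hgo : binChars v = binCharsGo (v / 2) ++ [if v % 2 = 1 then '1' else '0'] := by
        unfold binChars
        rw [if_neg (by omega), binCharsGo, dif_neg (by omega)]
      have hgo2 : binChars (v / 2) = binCharsGo (v / 2) := by
        unfold binChars; rw [if_neg (by omega)]
      rw [hgo, hgo2]
      unfold padTo
      simp only [List.length_append, List.length_singleton]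
      rw [List.append_assoc]
      congr 1
      congr 1
      omega

-- proof devices: big-endian byte list of v (k bytes) and its value
def toBytesBE (v : Nat) : Nat → List Nat
  | 0 => []
  | k + 1 => toBytesBE (v / 256) k ++ [v % 256]

def fromBytesBE (bs : List Nat) : Nat := bs.foldl (fun a b => 256 * a + b) 0

set_option maxRecDepth 8192 in
theorem tbl_lt (b : Nat) : sboxTableList.getD b 0 < 256 := by
  have hall : sboxTableList.all (fun x => decide (x < 256)) = true := by decide
  rw [List.getD_eq_getElem?_getD]
  cases h : sboxTableList[b]? with
  | none => simp
  | some x =>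
    have hx : x ∈ sboxTableList := List.mem_of_getElem? h
    have := List.all_eq_true.mp hall x hx
    simpa using this

-- the packed-constant lookup agrees with the list lookup on every byte value
set_option maxRecDepth 8192 in
theorem getD_eq_tbl : ∀ b : Nat, b < 256 → sboxTableList.getD b 0 = tbl b := by
  decide

theorem sboxChunks_nil : sboxChunks [] = [] := by
  rw [sboxChunks]; rfl

theorem sboxChunks_cons (l : List Char) (h : l ≠ []) :
    sboxChunks l =
      padTo 8 (binChars (sboxTableList.getD (parseBin (l.take 8)) 0)) ++ sboxChunks (l.drop 8) := by
  rw [sboxChunks, dif_neg h]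

theorem sboxChunks_append (k : Nat) :
    ∀ l m : List Char, l.length = 8 * k →
      sboxChunks (l ++ m) = sboxChunks l ++ sboxChunks m := by
  induction k with
  | zero =>
    intro l m hl
    have : l = [] := List.eq_nil_of_length_eq_zero (by omega)
    simp [this, sboxChunks_nil]
  | succ k ih =>
    intro l m hl
    have hlen : 8 ≤ l.length := by omega
    have hne : l ≠ [] := by
      intro h; subst h; simp at hl
    have hne2 : l ++ m ≠ [] := by
      intro h
      exact hne (List.append_eq_nil_iff.mp h).1
    rw [sboxChunks_cons _ hne2, sboxChunks_cons _ hne]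
    rw [List.take_append_of_le_length hlen, List.drop_append_of_le_length hlen]
    rw [ih (l.drop 8) m (by simp [List.length_drop]; omega)]
    rw [List.append_assoc]

theorem chunk_byte_step (k : Nat) :
    ∀ v : Nat, v < 2 ^ (8 * k) → parseBin (sboxChunks (bitsFix (8 * k) v))
      = fromBytesBE ((toBytesBE v k).map (fun b => sboxTableList.getD b 0)) := by
  induction k with
  | zero =>
    intro v h
    have : v = 0 := by simpa using h
    subst this
    simp [bitsFix, sboxChunks_nil, toBytesBE, fromBytesBE, parseBin]
  | succ k ih =>
    intro v h
    have hsplit : bitsFix (8 * (k + 1)) v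
        = bitsFix (8 * k) (v / 256) ++ bitsFix 8 (v % 256) := by
      have h1 : 8 * (k + 1) = 8 * k + 8 := by ring
      rw [h1, bitsFix_split]
      norm_num
    have hdiv : v / 256 < 2 ^ (8 * k) := by
      rw [Nat.div_lt_iff_lt_mul (by norm_num : 0 < 256)]
      calc v < 2 ^ (8 * (k + 1)) := h
        _ = 2 ^ (8 * k) * 256 := by rw [show 8 * (k+1) = 8*k + 8 by ring, pow_add]; norm_num
    have hmod : v % 256 < 2 ^ 8 := by
      have := Nat.mod_lt v (by norm_num : 0 < 256)
      simpa using this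
    have hlen8 : (bitsFix 8 (v % 256)).length = 8 := length_bitsFix 8 _
    have hne : bitsFix 8 (v % 256) ≠ [] := by
      intro hh; rw [hh] at hlen8; simp at hlen8
    have hlast : sboxChunks (bitsFix 8 (v % 256))
        = padTo 8 (binChars (sboxTableList.getD (v % 256) 0)) := by
      rw [sboxChunks_cons _ hne]
      rw [List.take_of_length_le (by omega), List.drop_of_length_le (by omega)]
      rw [sboxChunks_nil, List.append_nil, parseBin_bitsFix 8 _ hmod]
    set t := sboxTableList.getD (v % 256) 0 with ht
    have htlt : t < 256 := tbl_lt _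
    have hpad : padTo 8 (binChars t) = bitsFix 8 t :=
      padTo_binChars 8 t (by norm_num) (by simpa using htlt)
    rw [hsplit, sboxChunks_append k _ _ (length_bitsFix _ _), parseBin_append]
    rw [hlast, hpad, length_bitsFix, parseBin_bitsFix 8 t (by simpa using htlt)]
    rw [ih _ hdiv]
    show _ * 2 ^ 8 + t = fromBytesBE ((toBytesBE v (k + 1)).map _)
    rw [toBytesBE, List.map_append]
    unfold fromBytesBE
    rw [List.foldl_append]
    simp only [List.map_cons, List.map_nil, List.foldl_cons, List.foldl_nil, ← ht]
    have h256 : (2 : Nat) ^ 8 = 256 := by norm_num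
    rw [h256]
    ring

-- bit-length bounds
theorem lt_two_pow_bitLenN (m : Nat) : m < 2 ^ bitLenN m := by
  fun_induction bitLenN m with
  | case1 => simp
  | case2 m h ih =>
    rw [pow_succ]
    omega

theorem bitLenN_le (m k : Nat) (h : m < 2 ^ k) : bitLenN m ≤ k := by
  fun_induction bitLenN m generalizing k with
  | case1 => omega
  | case2 m hm ih =>
    have hk : k ≠ 0 := by
      intro hk; subst hk; simp at h; omega
    obtain ⟨k', rfl⟩ := Nat.exists_eq_succ_of_ne_zero hk
    have : m / 2 < 2 ^ k' := by rw [pow_succ] at h; omega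
    have := ih k' this
    omega

-- A's bit-length recursion agrees with B's log2-based formula
theorem bitLenN_eq_log2 (m : Nat) : bitLenN m = if m = 0 then 0 else Nat.log2 m + 1 := by
  by_cases h : m = 0
  · subst h; rw [bitLenN]; simp
  · rw [if_neg h]
    have h1 : m < 2 ^ (Nat.log2 m + 1) := (Nat.log2_lt h).mp (Nat.lt_succ_self _)
    have h2 : m < 2 ^ bitLenN m := lt_two_pow_bitLenN m
    have h3 : bitLenN m ≤ Nat.log2 m + 1 := bitLenN_le _ _ h1
    have h4 : Nat.log2 m < bitLenN m := (Nat.log2_lt h).mpr h2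
    omega

theorem bitLenN_double_succ (v : Nat) : bitLenN (2 * v + 1) = bitLenN v + 1 := by
  rw [bitLenN]
  rw [dif_neg (by omega)]
  congr 1
  congr 1
  omega

theorem adjust_small (n : Int) (hn : 0 ≤ n) (hd : n ≤ 2147483648) :
    adjust n 2048 = (2 * n + 1) * 2 ^ (2048 - bitLenN (2 * n + 1).natAbs) := by
  unfold adjust
  have hbl : pyBitLength n < 2048 := by
    unfold pyBitLength
    have : n.natAbs < 2 ^ 32 := by
      have : n.natAbs ≤ 2147483648 := by omega
      omega
    have := bitLenN_le n.natAbs 32 this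
    omega
  rw [if_pos hbl]
  rfl

-- A's adjust and B's normAlt compute the same 2048-bit value on the admitted inputs
theorem adjust_eq_normAlt (n : Int) (hn : 0 ≤ n) (hd : n ≤ 2147483648) :
    (adjust n 2048).toNat = normAlt n.toNat 2048 := by
  rw [adjust_small n hn hd]
  set v := n.toNat with hv
  have hnv : n = (v : Int) := by omega
  have habs : (2 * n + 1).natAbs = 2 * v + 1 := by omega
  have hL : bitLenN v ≤ 32 := by
    apply bitLenN_le
    have : v ≤ 2147483648 := by omega
    omega
  have hlen : bitLenN (2 * v + 1) = bitLenN v + 1 := bitLenN_double_succ v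
  have hexp : 2048 - bitLenN (2 * v + 1) = 2048 - 1 - bitLenN v := by omega
  have htoNat : ((2 * n + 1) * 2 ^ (2048 - bitLenN (2 * n + 1).natAbs)).toNat
      = (2 * v + 1) * 2 ^ (2048 - bitLenN (2 * v + 1)) := by
    rw [habs, hnv]
    have : ((2 * (v : Int) + 1) * 2 ^ (2048 - bitLenN (2 * v + 1)))
        = (((2 * v + 1) * 2 ^ (2048 - bitLenN (2 * v + 1)) : Nat) : Int) := by
      push_cast; ring
    rw [this, Int.toNat_natCast]
  rw [htoNat, hexp]
  unfold normAlt
  have hlog : (if v = 0 then 0 else Nat.log2 v + 1) = bitLenN v := (bitLenN_eq_log2 v).symm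
  simp only [hlog]
  rw [if_pos (by omega)]
  rw [Nat.shiftLeft_eq]

theorem adjust_toNat_lt (n : Int) (hn : 0 ≤ n) (hd : n ≤ 2147483648) :
    (adjust n 2048).toNat < 2 ^ 2048 := by
  rw [adjust_small n hn hd]
  set u := (2 * n + 1).natAbs with hu
  have hupos : (2 * n + 1 : Int) = (u : Int) := by
    rw [hu]; rw [Int.natAbs_of_nonneg (by omega)]
  have hbl1 : 1 ≤ bitLenN u := by
    have : u ≠ 0 := by omega
    rw [bitLenN, dif_neg this]
    omega
  have hble : bitLenN u ≤ 2048 := by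
    apply bitLenN_le
    have : u ≤ 2 ^ 33 := by omega
    calc u < 2 ^ 34 := by omega
      _ ≤ 2 ^ 2048 := Nat.pow_le_pow_right (by norm_num) (by norm_num)
  have hlt : u < 2 ^ bitLenN u := lt_two_pow_bitLenN u
  have : ((2 * n + 1) * 2 ^ (2048 - bitLenN u)).toNat = u * 2 ^ (2048 - bitLenN u) := by
    rw [hupos]
    have hc : ((u : Int) * 2 ^ (2048 - bitLenN u)) = ((u * 2 ^ (2048 - bitLenN u) : Nat) : Int) := by
      push_cast
      ring
    rw [hc, Int.toNat_natCast]
  rw [this]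
  calc u * 2 ^ (2048 - bitLenN u) < 2 ^ bitLenN u * 2 ^ (2048 - bitLenN u) := by
        apply Nat.mul_lt_mul_right (Nat.two_pow_pos _) |>.mpr hlt
    _ = 2 ^ 2048 := by rw [← pow_add]; congr 1; omega

-- every byte produced by toBytesBE is < 256
theorem toBytesBE_lt : ∀ (k v b : Nat), b ∈ toBytesBE v k → b < 256 := by
  intro k
  induction k with
  | zero => intro v b h; simp [toBytesBE] at h
  | succ k ih =>
    intro v b h
    rw [toBytesBE, List.mem_append] at h
    rcases h with h | h
    · exact ih _ _ h
    · simp at h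
      subst h
      exact Nat.mod_lt _ (by norm_num)

-- little-endian evaluation of the mapped byte string (proof device matching B's loop)
def sumLE (v : Nat) : Nat → Nat
  | 0 => 0
  | k + 1 => tbl (v % 256) + 256 * sumLE (v / 256) k

theorem sumLE_eq_fromBytes : ∀ (k v : Nat),
    sumLE v k = fromBytesBE ((toBytesBE v k).map tbl) := by
  intro k
  induction k with
  | zero => intro v; simp [sumLE, toBytesBE, fromBytesBE]
  | succ k ih =>
    intro v
    rw [sumLE, ih (v / 256), toBytesBE, List.map_append]
    unfold fromBytesBE
    rw [List.foldl_append]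
    simp only [List.map_cons, List.map_nil, List.foldl_cons, List.foldl_nil]
    ring

theorem sumLE_succ_top : ∀ (k v : Nat),
    sumLE v (k + 1) = sumLE v k + tbl (v / 2 ^ (8 * k) % 256) * 2 ^ (8 * k) := by
  intro k
  induction k with
  | zero => intro v; simp [sumLE]
  | succ k ih =>
    intro v
    rw [sumLE, ih (v / 256)]
    have hdd : v / 256 / 2 ^ (8 * k) = v / 2 ^ (8 * (k + 1)) := by
      rw [Nat.div_div_eq_div_mul]
      congr 1
      rw [show 8 * (k + 1) = 8 + 8 * k by ring, pow_add]
      norm_num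
    rw [hdd]
    show _ = sumLE v (k + 1) + _
    rw [sumLE]
    have hp : (256 : Nat) * 2 ^ (8 * k) = 2 ^ (8 * (k + 1)) := by
      rw [show 8 * (k + 1) = 8 + 8 * k by ring, pow_add]
      norm_num
    rw [← hp]
    ring

-- B's foldl over range k equals the little-endian sum
theorem foldl_range_eq_sumLE (v : Nat) : ∀ k : Nat,
    (List.range k).foldl (fun out i => out + (tbl (v >>> (8 * i) &&& 255)) <<< (8 * i)) 0
      = sumLE v k := by
  intro k
  induction k with
  | zero => simp [sumLE]
  | succ k ih =>
    rw [List.range_succ, List.foldl_append, ih, List.foldl_cons, List.foldl_nil]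
    have hbyte : v >>> (8 * k) &&& 255 = v / 2 ^ (8 * k) % 256 := by
      rw [Nat.shiftRight_eq_div_pow]
      have : (255 : Nat) = 2 ^ 8 - 1 := by norm_num
      rw [this, Nat.and_two_pow_sub_one_eq_mod]
    rw [hbyte, Nat.shiftLeft_eq, sumLE_succ_top]

-- ===== VERDICT (by name: the statement is the Claim_ definition above) =====
set_option maxRecDepth 8192 in
set_option maxHeartbeats 1000000 in
theorem sbox_spec : Claim_equal_sbox := by
  intro n hdom hpre
  unfold Spec_sbox
  have hn : 0 ≤ n := hpre
  have hd : n ≤ 2147483648 := by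
    unfold Dom_sbox pvDomInt at hdom
    exact (of_decide_eq_true hdom).2
  have hvlt : (adjust n 2048).toNat < 2 ^ 2048 := adjust_toNat_lt n hn hd
  set V := (adjust n 2048).toNat with hV
  have hmapeq : (toBytesBE V 256).map (fun b => sboxTableList.getD b 0)
      = (toBytesBE V 256).map tbl := by
    apply List.map_congr_left
    intro b hb
    exact getD_eq_tbl b (toBytesBE_lt 256 V b hb)
  have hnat : parseBin (sboxChunks (padTo 2048 (binChars V)))
      = (List.range 256).foldl
          (fun out i => out + (tbl (normAlt n.toNat 2048 >>> (8 * i) &&& 255)) <<< (8 * i)) 0 := by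
    rw [padTo_binChars 2048 _ (by norm_num) hvlt]
    have h2048 : (2048 : Nat) = 8 * 256 := by norm_num
    rw [h2048] at hvlt
    rw [show bitsFix 2048 V = bitsFix (8 * 256) V by norm_num]
    rw [chunk_byte_step 256 _ hvlt, hmapeq, ← sumLE_eq_fromBytes]
    rw [← adjust_eq_normAlt n hn hd, ← hV]
    exact (foldl_range_eq_sumLE V 256).symm
  show sbox n = sbox_alt n
  unfold sbox sbox_alt
  exact congrArg Int.ofNat hnat
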